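-- pv_equiv track=rewrite | github.com/calvynddb/nexo-database | backend/services/list_pipeline_service.py | filter_students
-- ===== SOURCE A (Python) =====
-- def filter_students(rows: list[tuple], query: str = "", advanced_filters=None) -> list[tuple]:
--     query = str(query or "").strip().lower()
--     advanced_filters = advanced_filters or {}
--
--     id_filter = str(advanced_filters.get("id", "")).strip().lower()
--     first_filter = str(advanced_filters.get("firstname", "")).strip().lower()
--     last_filter = str(advanced_filters.get("lastname", "")).strip().lower()
--     gender_filter = str(advanced_filters.get("gender", "")).strip().lower()
--     year_filter = str(advanced_filters.get("year", "")).strip().lower()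
--     program_filter = str(advanced_filters.get("program", "")).strip().lower()
--     college_filter = str(advanced_filters.get("college", "")).strip().lower()
--
--     filtered = []
--     for row in rows or []:
--         sid, firstname, lastname, gender, year, program, college = row
--
--         sid_l = str(sid).lower()
--         firstname_l = str(firstname).lower()
--         lastname_l = str(lastname).lower()
--         gender_l = str(gender).lower()
--         year_l = str(year).lower()
--         program_l = str(program).lower()
--         college_l = str(college).lower()
--
--         if query and not (
--             query in firstname_l
--             or query in lastname_l
--             or query in sid_l
--             or query in gender_l
--             or query in program_l
--             or query in year_l
--             or query in college_l
--         ):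
--             continue
--
--         if id_filter and id_filter not in sid_l:
--             continue
--         if first_filter and first_filter not in firstname_l:
--             continue
--         if last_filter and last_filter not in lastname_l:
--             continue
--         if gender_filter and gender_filter != "any" and gender_filter != gender_l:
--             continue
--         if year_filter and year_filter != "any" and year_filter != year_l:
--             continue
--         if program_filter and program_filter != "any" and program_filter != program_l:
--             continue
--         if college_filter and college_filter != "any" and college_filter != college_l:
--             continue
--
--         filtered.append(row)
--
--     return filtered
-- ===== SOURCE B (Python) =====
-- def filter_students(rows: list[tuple], query: str = "", advanced_filters=None) -> list[tuple]:
--     query = str(query or "").strip().lower()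
--     af = advanced_filters or {}
--
--     def norm(k):
--         return str(af.get(k, "")).strip().lower()
--
--     # Stage 0: build an index pairing each row with its lowered fields.
--     # The 7-way unpack is unconditional, so a wrong-length row raises here like in A.
--     pool = []
--     for row in rows or []:
--         sid, fn, ln, g, y, p, c = row
--         pool.append((row, (str(sid).lower(), str(fn).lower(), str(ln).lower(),
--                            str(g).lower(), str(y).lower(), str(p).lower(), str(c).lower())))
--
--     # Staged filtering passes over the index, one per active filter.
--     if query:
--         pool = [e for e in pool
--                 if query in e[1][1] or query in e[1][2] or query in e[1][0]
--                 or query in e[1][3] or query in e[1][5] or query in e[1][4]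
--                 or query in e[1][6]]
--     id_f = norm("id")
--     if id_f:
--         pool = [e for e in pool if id_f in e[1][0]]
--     first_f = norm("firstname")
--     if first_f:
--         pool = [e for e in pool if first_f in e[1][1]]
--     last_f = norm("lastname")
--     if last_f:
--         pool = [e for e in pool if last_f in e[1][2]]
--     gender_f = norm("gender")
--     if gender_f and gender_f != "any":
--         pool = [e for e in pool if gender_f == e[1][3]]
--     year_f = norm("year")
--     if year_f and year_f != "any":
--         pool = [e for e in pool if year_f == e[1][4]]
--     program_f = norm("program")
--     if program_f and program_f != "any":
--         pool = [e for e in pool if program_f == e[1][5]]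
--     college_f = norm("college")
--     if college_f and college_f != "any":
--         pool = [e for e in pool if college_f == e[1][6]]
--
--     return [e[0] for e in pool]
-- ===== Notes on version B (the rewrite author's own statement) =====
-- stated objective: alternative
-- what changed: B first builds an index pairing each row with its lowered 7-field tuple in one pass, then applies each active filter as a separate staged filtering pass over that index, and finally projects the rows back, instead of A's single loop with an eight-way continue chain re-evaluating every guard per row.
import Mathlib
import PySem

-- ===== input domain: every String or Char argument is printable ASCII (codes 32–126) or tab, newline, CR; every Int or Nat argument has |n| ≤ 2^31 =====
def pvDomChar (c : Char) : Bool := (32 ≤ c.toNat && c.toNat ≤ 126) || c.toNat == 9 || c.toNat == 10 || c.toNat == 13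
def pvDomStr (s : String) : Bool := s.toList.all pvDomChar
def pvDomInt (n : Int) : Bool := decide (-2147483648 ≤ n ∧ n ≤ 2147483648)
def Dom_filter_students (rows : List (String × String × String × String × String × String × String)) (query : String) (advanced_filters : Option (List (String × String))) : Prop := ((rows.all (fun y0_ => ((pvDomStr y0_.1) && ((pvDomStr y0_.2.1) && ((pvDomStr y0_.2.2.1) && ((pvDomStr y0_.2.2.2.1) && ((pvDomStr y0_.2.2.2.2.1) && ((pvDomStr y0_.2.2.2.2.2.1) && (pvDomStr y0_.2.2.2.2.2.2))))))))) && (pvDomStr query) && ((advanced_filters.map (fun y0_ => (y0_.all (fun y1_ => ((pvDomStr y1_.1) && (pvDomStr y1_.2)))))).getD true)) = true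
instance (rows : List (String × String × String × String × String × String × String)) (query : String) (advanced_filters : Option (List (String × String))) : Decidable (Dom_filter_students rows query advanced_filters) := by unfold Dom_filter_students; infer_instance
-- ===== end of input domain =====

-- B builds an index of (row, lowered fields) in one pass, then applies each active filter
-- as a separate staged filtering pass over the index, then projects back (objective: alternative).

-- ===== PORT A =====
-- literal transliteration of A: query/filters normalized, then one loop with a continue chain
def filter_students (rows : List (String × String × String × String × String × String × String)) (query : String) (advanced_filters : Option (List (String × String))) : List (String × String × String × String × String × String × String) :=
  let query := PySem.Str.lower (PySem.Str.strip query)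
  let af := PySem.Dict.mk (advanced_filters.getD [])
  let id_filter := PySem.Str.lower (PySem.Str.strip (af.getD "id" ""))
  let first_filter := PySem.Str.lower (PySem.Str.strip (af.getD "firstname" ""))
  let last_filter := PySem.Str.lower (PySem.Str.strip (af.getD "lastname" ""))
  let gender_filter := PySem.Str.lower (PySem.Str.strip (af.getD "gender" ""))
  let year_filter := PySem.Str.lower (PySem.Str.strip (af.getD "year" ""))
  let program_filter := PySem.Str.lower (PySem.Str.strip (af.getD "program" ""))
  let college_filter := PySem.Str.lower (PySem.Str.strip (af.getD "college" ""))
  rows.foldl (fun filtered row =>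
    let sid_l := PySem.Str.lower row.1
    let firstname_l := PySem.Str.lower row.2.1
    let lastname_l := PySem.Str.lower row.2.2.1
    let gender_l := PySem.Str.lower row.2.2.2.1
    let year_l := PySem.Str.lower row.2.2.2.2.1
    let program_l := PySem.Str.lower row.2.2.2.2.2.1
    let college_l := PySem.Str.lower row.2.2.2.2.2.2
    if query != "" && !(PySem.Str.isIn query firstname_l || PySem.Str.isIn query lastname_l || PySem.Str.isIn query sid_l || PySem.Str.isIn query gender_l || PySem.Str.isIn query program_l || PySem.Str.isIn query year_l || PySem.Str.isIn query college_l) then filtered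
    else if id_filter != "" && !(PySem.Str.isIn id_filter sid_l) then filtered
    else if first_filter != "" && !(PySem.Str.isIn first_filter firstname_l) then filtered
    else if last_filter != "" && !(PySem.Str.isIn last_filter lastname_l) then filtered
    else if gender_filter != "" && gender_filter != "any" && gender_filter != gender_l then filtered
    else if year_filter != "" && year_filter != "any" && year_filter != year_l then filtered
    else if program_filter != "" && program_filter != "any" && program_filter != program_l then filtered
    else if college_filter != "" && college_filter != "any" && college_filter != college_l then filtered
    else filtered ++ [row]) []

-- ===== PORT B =====
-- literal transliteration of B: build the (row, lowered fields) index, then one staged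
-- filtering pass per active filter, then project the rows back out
def filter_students_alt (rows : List (String × String × String × String × String × String × String)) (query : String) (advanced_filters : Option (List (String × String))) : List (String × String × String × String × String × String × String) :=
  let query := PySem.Str.lower (PySem.Str.strip query)
  let af := PySem.Dict.mk (advanced_filters.getD [])
  let norm := fun (k : String) => PySem.Str.lower (PySem.Str.strip (af.getD k ""))
  let pool := rows.map (fun row =>
    (row, (PySem.Str.lower row.1, PySem.Str.lower row.2.1, PySem.Str.lower row.2.2.1,
           PySem.Str.lower row.2.2.2.1, PySem.Str.lower row.2.2.2.2.1,
           PySem.Str.lower row.2.2.2.2.2.1, PySem.Str.lower row.2.2.2.2.2.2)))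
  let pool := if query != "" then pool.filter (fun e => PySem.Str.isIn query e.2.2.1 || PySem.Str.isIn query e.2.2.2.1 || PySem.Str.isIn query e.2.1 || PySem.Str.isIn query e.2.2.2.2.1 || PySem.Str.isIn query e.2.2.2.2.2.2.1 || PySem.Str.isIn query e.2.2.2.2.2.1 || PySem.Str.isIn query e.2.2.2.2.2.2.2) else pool
  let id_f := norm "id"
  let pool := if id_f != "" then pool.filter (fun e => PySem.Str.isIn id_f e.2.1) else pool
  let first_f := norm "firstname"
  let pool := if first_f != "" then pool.filter (fun e => PySem.Str.isIn first_f e.2.2.1) else pool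
  let last_f := norm "lastname"
  let pool := if last_f != "" then pool.filter (fun e => PySem.Str.isIn last_f e.2.2.2.1) else pool
  let gender_f := norm "gender"
  let pool := if gender_f != "" && gender_f != "any" then pool.filter (fun e => gender_f == e.2.2.2.2.1) else pool
  let year_f := norm "year"
  let pool := if year_f != "" && year_f != "any" then pool.filter (fun e => year_f == e.2.2.2.2.2.1) else pool
  let program_f := norm "program"
  let pool := if program_f != "" && program_f != "any" then pool.filter (fun e => program_f == e.2.2.2.2.2.2.1) else pool
  let college_f := norm "college"
  let pool := if college_f != "" && college_f != "any" then pool.filter (fun e => college_f == e.2.2.2.2.2.2.2) else pool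
  pool.map (fun e => e.1)

-- ===== PRECONDITION & SPEC =====
def Spec_filter_students (rows : List (String × String × String × String × String × String × String)) (query : String) (advanced_filters : Option (List (String × String))) (out : List (String × String × String × String × String × String × String)) : Prop := out = filter_students_alt rows query advanced_filters
instance (rows : List (String × String × String × String × String × String × String)) (query : String) (advanced_filters : Option (List (String × String))) (out : List (String × String × String × String × String × String × String)) : Decidable (Spec_filter_students rows query advanced_filters out) := by
  unfold Spec_filter_students
  haveI h7 : DecidableEq (String × String × String × String × String × String × String) := instDecidableEqProd
  infer_instance

-- ===== CLAIM (what is proved, stated in full; the proofs are below) =====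
def Claim_equal_filter_students : Prop := ∀ (rows : List (String × String × String × String × String × String × String)) (query : String) (advanced_filters : Option (List (String × String))), Dom_filter_students rows query advanced_filters → Spec_filter_students rows query advanced_filters (filter_students rows query advanced_filters)

-- ===== LEMMAS AND PROOFS =====

-- A continue-chain step appends the row iff every guard fails
theorem pv_step_eq {α : Type} (acc : List α) (x : α) (c1 c2 c3 c4 c5 c6 c7 c8 : Bool) :
    (if c1 then acc else if c2 then acc else if c3 then acc else if c4 then acc
     else if c5 then acc else if c6 then acc else if c7 then acc else if c8 then acc
     else acc ++ [x])
    = if (!c1 && !c2 && !c3 && !c4 && !c5 && !c6 && !c7 && !c8) then acc ++ [x] else acc := by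
  cases c1 <;> cases c2 <;> cases c3 <;> cases c4 <;> cases c5 <;> cases c6 <;> cases c7 <;> cases c8 <;> simp

-- a foldl that conditionally appends is a filter
theorem pv_foldl_filter {α : Type} (p : α → Bool) (xs : List α) (acc : List α) :
    xs.foldl (fun acc x => if p x then acc ++ [x] else acc) acc = acc ++ xs.filter p := by
  induction xs generalizing acc with
  | nil => simp
  | cons x xs ih =>
    by_cases h : p x <;> simp [List.foldl_cons, h, ih]

-- reversing an eight-fold conjunction
theorem pv_and_rev (b1 b2 b3 b4 b5 b6 b7 b8 : Bool) :
    (b1 && (b2 && (b3 && (b4 && (b5 && (b6 && (b7 && b8)))))))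
    = (b8 && (b7 && (b6 && (b5 && (b4 && (b3 && (b2 && b1))))))) := by
  cases b1 <;> cases b2 <;> cases b3 <;> cases b4 <;> cases b5 <;> cases b6 <;> cases b7 <;> cases b8 <;> rfl

-- a conditional staged pass is a filter with a weakened predicate
theorem pv_if_filter {α : Type} (c : Bool) (p : α → Bool) (l : List α) :
    (if c then l.filter p else l) = l.filter (fun x => !c || p x) := by
  cases c <;> simp

-- ===== VERDICT (by name: the statement is the Claim_ definition above) =====
set_option maxHeartbeats 1000000 in
theorem filter_students_spec : Claim_equal_filter_students := by
  intro rows query advanced_filters _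
  unfold Spec_filter_students filter_students filter_students_alt
  simp only [pv_step_eq, pv_foldl_filter, List.nil_append]
  simp only [pv_if_filter]
  simp only [List.filter_filter]
  rw [List.filter_map, List.map_map]
  rw [show ((fun (e : (String × String × String × String × String × String × String) × (String × String × String × String × String × String × String)) => e.1) ∘
      (fun (row : String × String × String × String × String × String × String) =>
        (row, (PySem.Str.lower row.1, PySem.Str.lower row.2.1, PySem.Str.lower row.2.2.1,
               PySem.Str.lower row.2.2.2.1, PySem.Str.lower row.2.2.2.2.1,
               PySem.Str.lower row.2.2.2.2.2.1, PySem.Str.lower row.2.2.2.2.2.2)))) = id from rfl]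
  rw [List.map_id]
  refine (List.filter_congr ?_)
  intro row _
  simp only [Function.comp]
  simp [bne, Bool.not_and, Bool.not_not, Bool.or_assoc, Bool.and_assoc]
  exact pv_and_rev _ _ _ _ _ _ _ _
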